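-- pv_equiv track=rewrite | github.com/AlexanderRubinstein/gvp | src/util.py | compute_indices_affecting_edge_types
-- ===== SOURCE A (Python) =====
-- def pairwise_label_to_labels_pair(pairwise_label, num_single_labels):
--     return [pairwise_label // num_single_labels, pairwise_label % num_single_labels]
--
-- def compute_indices_affecting_edge_types(num_single_labels):
--     indices_affecting_first_type = [[] for i in range(num_single_labels)]
--     indices_affecting_second_type = [[] for i in range(num_single_labels)]
--
--     for idx in range(num_single_labels * num_single_labels):
--         first_type, second_type = pairwise_label_to_labels_pair(idx, num_single_labels)
--         indices_affecting_first_type[first_type].append(idx)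
--         indices_affecting_second_type[second_type].append(idx)
--
--     return indices_affecting_first_type, indices_affecting_second_type
-- ===== SOURCE B (Python) =====
-- def compute_indices_affecting_edge_types(num_single_labels):
--     n = num_single_labels
--     indices_affecting_first_type = [list(range(k * n, k * n + n)) for k in range(n)]
--     indices_affecting_second_type = [list(range(k, n * n, n)) for k in range(n)]
--     return indices_affecting_first_type, indices_affecting_second_type
-- ===== Notes on version B (the rewrite author's own statement) =====
-- stated objective: simpler
-- what changed: A runs one flat loop over all n*n pair indices, decoding each with div/mod and appending into pre-built empty buckets; B builds each bucket directly from its closed-form pattern: bucket k of the first grouping is the contiguous block range(k*n, k*n+n) and bucket k of the second is the stride-n sequence range(k, n*n, n).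
import Mathlib
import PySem

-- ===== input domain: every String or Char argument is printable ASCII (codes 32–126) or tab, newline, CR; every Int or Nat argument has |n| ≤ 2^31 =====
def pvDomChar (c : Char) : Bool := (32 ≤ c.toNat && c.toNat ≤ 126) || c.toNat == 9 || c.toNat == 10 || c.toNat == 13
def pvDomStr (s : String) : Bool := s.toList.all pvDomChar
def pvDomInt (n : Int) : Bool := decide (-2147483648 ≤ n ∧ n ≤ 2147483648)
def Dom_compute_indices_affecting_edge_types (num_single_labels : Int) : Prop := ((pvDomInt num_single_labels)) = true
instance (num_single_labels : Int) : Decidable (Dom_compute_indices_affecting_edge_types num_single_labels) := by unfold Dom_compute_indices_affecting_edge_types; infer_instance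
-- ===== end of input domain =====

-- B replaces A's single flat n*n loop (div/mod decode + append into buckets) by building each
-- bucket directly from its closed-form range pattern; objective: simpler, same O(n^2) cost.

-- ===== PORT A =====
def pairwise_label_to_labels_pair (pairwise_label : Int) (num_single_labels : Int) : Int × Int :=
  (PySem.Int.floordiv pairwise_label num_single_labels,
   PySem.Int.mod pairwise_label num_single_labels)

-- 'for idx in range(n*n)' is ported as counting recursion (fuel = the loop's trip count, idx the
-- running loop variable); 'lst[first_type].append(idx)' reads lst[i] with pyGet? (none = IndexError:
-- the recursion stops there exactly where Python raises, outside Pre_) and writes back with pySetD.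
def pv_loopA (n : Int) : Nat → Int → List (List Int) × List (List Int) → List (List Int) × List (List Int)
  | 0, _, s => s
  | fuel + 1, idx, s =>
    let ft := pairwise_label_to_labels_pair idx n
    match PySem.List.pyGet? s.1 ft.1, PySem.List.pyGet? s.2 ft.2 with
    | some l1, some l2 =>
        pv_loopA n fuel (idx + 1)
          (PySem.List.pySetD s.1 ft.1 (l1 ++ [idx]), PySem.List.pySetD s.2 ft.2 (l2 ++ [idx]))
    | _, _ => s

def compute_indices_affecting_edge_types (num_single_labels : Int) :
    List (List Int) × List (List Int) :=
  let indices_affecting_first_type : List (List Int) :=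
    (PySem.List.pyRange 0 num_single_labels 1).map (fun _ => [])
  let indices_affecting_second_type : List (List Int) :=
    (PySem.List.pyRange 0 num_single_labels 1).map (fun _ => [])
  pv_loopA num_single_labels (num_single_labels * num_single_labels).toNat 0
    (indices_affecting_first_type, indices_affecting_second_type)

-- ===== PORT B =====
def compute_indices_affecting_edge_types_alt (num_single_labels : Int) :
    List (List Int) × List (List Int) :=
  ((PySem.List.pyRange 0 num_single_labels 1).map
     (fun k => PySem.List.pyRange (k * num_single_labels)
                 (k * num_single_labels + num_single_labels) 1),
   (PySem.List.pyRange 0 num_single_labels 1).map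
     (fun k => PySem.List.pyRange k (num_single_labels * num_single_labels) num_single_labels))

-- ===== PRECONDITION & SPEC =====
-- A raises IndexError for negative num_single_labels (the buckets are empty but the n*n loop still runs)
def Pre_compute_indices_affecting_edge_types (num_single_labels : Int) : Prop :=
  0 ≤ num_single_labels
instance (num_single_labels : Int) : Decidable (Pre_compute_indices_affecting_edge_types num_single_labels) := by unfold Pre_compute_indices_affecting_edge_types; infer_instance
def pvWitness_compute_indices_affecting_edge_types : Int := 3


def Spec_compute_indices_affecting_edge_types (num_single_labels : Int) (out : List (List Int) × List (List Int)) : Prop := out = compute_indices_affecting_edge_types_alt num_single_labels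
instance (num_single_labels : Int) (out : List (List Int) × List (List Int)) : Decidable (Spec_compute_indices_affecting_edge_types num_single_labels out) := by unfold Spec_compute_indices_affecting_edge_types; infer_instance

-- ===== CLAIM (what is proved, stated in full; the proofs are below) =====
def Claim_equal_compute_indices_affecting_edge_types : Prop := ∀ (num_single_labels : Int), Dom_compute_indices_affecting_edge_types num_single_labels → Pre_compute_indices_affecting_edge_types num_single_labels → Spec_compute_indices_affecting_edge_types num_single_labels (compute_indices_affecting_edge_types num_single_labels)

-- ===== LEMMAS AND PROOFS =====

lemma pv_set_map_range {β : Type} (f : Nat → β) (N j : Nat) (v : β) (_hj : j < N) :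
    ((List.range N).map f).set j v = (List.range N).map (fun k => if k = j then v else f k) := by
  apply List.ext_getElem
  · simp
  · intro i h1 h2
    simp only [List.length_set, List.length_map, List.length_range] at h1
    simp only [List.getElem_set, List.getElem_map, List.getElem_range]
    by_cases h : j = i
    · simp [h]
    · simp [h, Ne.symm h]

lemma pv_filter_range_eq (N k : Nat) (hk : k < N) :
    (List.range N).filter (fun t => t = k) = [k] := by
  induction N with
  | zero => omega
  | succ n ih =>
    rcases Nat.lt_succ_iff_lt_or_eq.mp hk with h | h
    · have hne : ¬ ((n : Nat) = k) := by omega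
      simp [List.range_succ, List.filter_append, ih h, hne]
    · subst h
      have hnil : (List.range k).filter (fun t => t = k) = [] := by
        apply List.filter_eq_nil_iff.mpr
        intro t ht
        simp only [List.mem_range] at ht
        simp; omega
      simp [List.range_succ, List.filter_append, hnil]

lemma pv_filter_div_ge (N c k : Nat) (hk : c ≤ k) :
    (List.range (c * N)).filter (fun i => i / N = k) = [] := by
  apply List.filter_eq_nil_iff.mpr
  intro i hi
  simp only [List.mem_range] at hi
  have hN : 0 < N := by
    rcases Nat.eq_zero_or_pos N with h | h
    · subst h; simp at hi
    · exact h
  have hlt : i / N < c := (Nat.div_lt_iff_lt_mul hN).mpr hi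
  simp only [decide_eq_true_eq]
  omega

lemma pv_filter_div (N c k : Nat) (hN : 0 < N) (hk : k < c) :
    (List.range (c * N)).filter (fun i => i / N = k) = (List.range N).map (fun t => k * N + t) := by
  induction c with
  | zero => omega
  | succ c ih =>
    have hsplit : List.range ((c + 1) * N) = List.range (c * N) ++ (List.range N).map (fun t => c * N + t) := by
      rw [Nat.succ_mul, List.range_add]
    have hblock : ∀ t : Nat, t < N → (c * N + t) / N = c := by
      intro t ht
      rw [Nat.mul_comm c N, Nat.mul_add_div hN]
      simp [Nat.div_eq_of_lt ht]
    rw [hsplit, List.filter_append, List.filter_map]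
    rcases Nat.lt_succ_iff_lt_or_eq.mp hk with h | h
    · have hblk : (List.range N).filter ((fun i => decide (i / N = k)) ∘ (fun t => c * N + t)) = [] := by
        apply List.filter_eq_nil_iff.mpr
        intro t ht
        simp only [List.mem_range] at ht
        simp only [Function.comp_apply, hblock t ht, decide_eq_true_eq]
        omega
      rw [hblk, ih h]; simp
    · subst h
      have hblk : (List.range N).filter ((fun i => decide (i / N = k)) ∘ (fun t => k * N + t)) = List.range N := by
        apply List.filter_eq_self.mpr
        intro t ht
        simp only [List.mem_range] at ht
        simp [hblock t ht]
      rw [hblk, pv_filter_div_ge N k k le_rfl]; simp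

lemma pv_filter_mod (N c k : Nat) (_hN : 0 < N) (hk : k < N) :
    (List.range (c * N)).filter (fun i => i % N = k) = (List.range c).map (fun t => k + N * t) := by
  induction c with
  | zero => simp
  | succ c ih =>
    have hsplit : List.range ((c + 1) * N) = List.range (c * N) ++ (List.range N).map (fun t => c * N + t) := by
      rw [Nat.succ_mul, List.range_add]
    have hblock : ∀ t : Nat, t < N → (c * N + t) % N = t := by
      intro t ht
      rw [Nat.mul_comm c N, Nat.mul_add_mod]
      exact Nat.mod_eq_of_lt ht
    have hblk : (List.range N).filter ((fun i => decide (i % N = k)) ∘ (fun t => c * N + t)) = [k] := by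
      have hcongr : (List.range N).filter ((fun i => decide (i % N = k)) ∘ (fun t => c * N + t))
          = (List.range N).filter (fun t => t = k) := by
        apply List.filter_congr
        intro t ht
        simp only [List.mem_range] at ht
        simp [Function.comp, hblock t ht]
      rw [hcongr]
      exact pv_filter_range_eq N k hk
    rw [hsplit, List.filter_append, List.filter_map, hblk, ih, List.range_succ, List.map_append]
    have : c * N + k = k + N * c := by ring
    simp [this]

lemma pv_loopA_inv (N : Nat) : ∀ (fuel m : Nat), fuel + m = N * N →
    pv_loopA (N : Int) fuel (m : Int)
      ((List.range N).map (fun k => ((List.range m).filter (fun i => i / N = k)).map (fun i : Nat => (i : Int))),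
       (List.range N).map (fun k => ((List.range m).filter (fun i => i % N = k)).map (fun i : Nat => (i : Int))))
    = ((List.range N).map (fun k => ((List.range (N * N)).filter (fun i => i / N = k)).map (fun i : Nat => (i : Int))),
       (List.range N).map (fun k => ((List.range (N * N)).filter (fun i => i % N = k)).map (fun i : Nat => (i : Int)))) := by
  intro fuel
  induction fuel with
  | zero =>
    intro m hm
    have hm' : m = N * N := by omega
    subst hm'
    rfl
  | succ fuel ih =>
    intro m hm
    have hmN : m < N * N := by omega
    have hN : 0 < N := by
      rcases Nat.eq_zero_or_pos N with h | h
      · subst h; simp at hmN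
      · exact h
    have hdiv : m / N < N := (Nat.div_lt_iff_lt_mul hN).mpr hmN
    have hmod : m % N < N := Nat.mod_lt _ hN
    rw [pv_loopA]
    simp only [pairwise_label_to_labels_pair]
    rw [PySem.Int.floordiv_natCast, PySem.Int.mod_natCast]
    simp only [PySem.List.pyGet?_natCast, List.getElem?_map, List.getElem?_range, hdiv, hmod,
      Option.map_some]
    simp only [PySem.List.pySetD_natCast]
    rw [pv_set_map_range _ N (m / N) _ hdiv, pv_set_map_range _ N (m % N) _ hmod]
    have hstep :
        ((List.range N).map (fun k => if k = m / N
            then ((List.range m).filter (fun i => i / N = m / N)).map (fun i : Nat => (i : Int)) ++ [(m : Int)]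
            else ((List.range m).filter (fun i => i / N = k)).map (fun i : Nat => (i : Int))),
         (List.range N).map (fun k => if k = m % N
            then ((List.range m).filter (fun i => i % N = m % N)).map (fun i : Nat => (i : Int)) ++ [(m : Int)]
            else ((List.range m).filter (fun i => i % N = k)).map (fun i : Nat => (i : Int))))
        = ((List.range N).map (fun k => ((List.range (m + 1)).filter (fun i => i / N = k)).map (fun i : Nat => (i : Int))),
           (List.range N).map (fun k => ((List.range (m + 1)).filter (fun i => i % N = k)).map (fun i : Nat => (i : Int)))) := by
      rw [Prod.mk.injEq]
      refine ⟨?_, ?_⟩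
      · apply List.map_congr_left
        intro k hk
        by_cases h : k = m / N
        · subst h
          simp [List.range_succ, List.filter_append]
        · have h' : ¬ (m / N = k) := fun hc => h hc.symm
          simp [List.range_succ, List.filter_append, h, h']
      · apply List.map_congr_left
        intro k hk
        by_cases h : k = m % N
        · subst h
          simp [List.range_succ, List.filter_append]
        · have h' : ¬ (m % N = k) := fun hc => h hc.symm
          simp [List.range_succ, List.filter_append, h, h']
    rw [hstep]
    have hcast : ((m : Int) + 1) = ((m + 1 : Nat) : Int) := by push_cast; ring
    rw [hcast, ih (m + 1) (by omega)]

-- ===== VERDICT (by name: the statement is the Claim_ definition above) =====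
theorem compute_indices_affecting_edge_types_spec : Claim_equal_compute_indices_affecting_edge_types := by
  intro n _ hpre
  unfold Spec_compute_indices_affecting_edge_types
  lift n to Nat using hpre with N
  have h1 : PySem.List.pyRange 0 (N : Int) 1 = (List.range N).map (fun i : Nat => (i : Int)) := by
    rw [PySem.List.pyRange_one]; simp
  simp only [compute_indices_affecting_edge_types, compute_indices_affecting_edge_types_alt,
    h1, List.map_map]
  rw [show ((fun (_ : Int) => ([] : List Int)) ∘ (fun (i : Nat) => (i : Int))) = (fun (_ : Nat) => ([] : List Int)) from rfl]
  rw [show ((N : Int) * (N : Int)).toNat = N * N by rw [← Nat.cast_mul, Int.toNat_natCast]]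
  rw [show ((fun (_ : Nat) => ([] : List Int)))
        = (fun k => ((List.range 0).filter (fun i => i / N = k)).map (fun i : Nat => (i : Int))) from rfl]
  rw [show ((0 : Int)) = ((0 : Nat) : Int) from rfl]
  have hinit : ((List.range N).map (fun k => ((List.range 0).filter (fun i => i / N = k)).map (fun i : Nat => (i : Int))),
       (List.range N).map (fun k => ((List.range 0).filter (fun i => i / N = k)).map (fun i : Nat => (i : Int))))
      = ((List.range N).map (fun k => ((List.range 0).filter (fun i => i / N = k)).map (fun i : Nat => (i : Int))),
       (List.range N).map (fun k => ((List.range 0).filter (fun i => i % N = k)).map (fun i : Nat => (i : Int)))) := rfl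
  rw [hinit, pv_loopA_inv N (N * N) 0 (by omega)]
  rw [Prod.mk.injEq]
  constructor
  · apply List.map_congr_left
    intro k hk
    simp only [List.mem_range] at hk
    have hN : 0 < N := by omega
    rw [pv_filter_div N N k hN hk]
    simp only [Function.comp_apply, PySem.List.pyRange_one]
    rw [show ((k : Int) * (N : Int) + (N : Int) - (k : Int) * (N : Int)).toNat = N by
      rw [show ((k : Int) * (N : Int) + (N : Int) - (k : Int) * (N : Int)) = (N : Int) by ring]; simp]
    rw [List.map_map]
    apply List.map_congr_left
    intro t _
    simp only [Function.comp_apply]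
    push_cast
    ring
  · apply List.map_congr_left
    intro k hk
    simp only [List.mem_range] at hk
    have hN : 0 < N := by omega
    rw [pv_filter_mod N N k hN hk]
    rw [Function.comp_apply, PySem.List.pyRange_of_pos _ _ (by exact_mod_cast hN)]
    have hcond : ((k : Int) < (N : Int) * (N : Int)) := by
      have : k < N * N := lt_of_lt_of_le hk (Nat.le_mul_of_pos_left N hN)
      exact_mod_cast this
    rw [if_pos hcond]
    rw [show ((N : Int) * (N : Int) - (k : Int) + (N : Int) - 1) = ((N * N + N - 1 - k : Nat) : Int) by omega]
    rw [show (((N * N + N - 1 - k : Nat) : Int) / ((N : Nat) : Int)) = (((N * N + N - 1 - k) / N : Nat) : Int) from (Int.natCast_div _ _).symm]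
    rw [Int.toNat_natCast]
    have hdivN : (N * N + N - 1 - k) / N = N := by
      rw [show N * N + N - 1 - k = N * N + (N - 1 - k) by omega]
      rw [Nat.mul_add_div hN, Nat.div_eq_of_lt (by omega)]
      omega
    rw [hdivN]
    rw [List.map_map]
    apply List.map_congr_left
    intro t _
    simp only [Function.comp_apply]
    push_cast
    ring
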